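-- pv_equiv track=rewrite | github.com/yofn/pyacm | codeforces/graph图论/1500/17B层级.py | f
-- ===== SOURCE A (Python) =====
-- def f(n,l):
--     pl = [None]*(n+1)   #p[0] is not used!
--     for a,b,c in l:
--         if pl[b] is None:
--             pl[b] = []
--         pl[b].append(c)
--     cr = sum([p is None for p in pl])
--     if cr>2:
--         return -1
--     return sum([min(p) for p in pl if p is not None])
-- ===== SOURCE B (Python) =====
-- def f(n, l):
--     # Sort edges by weight once; a greedy scan takes the first (= cheapest) edge
--     # seen per destination node, so no per-node weight buckets or min() pass exist.
--     m = n + 1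
--     taken = [False] * m
--     cnt = 0
--     total = 0
--     for a, b, c in sorted(l, key=lambda e: e[2]):
--         if not taken[b]:
--             taken[b] = True
--             cnt += 1
--             total += c
--     return -1 if m - cnt > 2 else total
-- ===== Notes on version B (the rewrite author's own statement) =====
-- stated objective: alternative
-- what changed: B sorts the edges by weight once and greedily sums the first (= cheapest) edge per destination node using a visited array and a taken-count, instead of A's per-node bucket array of all edge weights followed by a separate min()-per-bucket pass.
import Mathlib
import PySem

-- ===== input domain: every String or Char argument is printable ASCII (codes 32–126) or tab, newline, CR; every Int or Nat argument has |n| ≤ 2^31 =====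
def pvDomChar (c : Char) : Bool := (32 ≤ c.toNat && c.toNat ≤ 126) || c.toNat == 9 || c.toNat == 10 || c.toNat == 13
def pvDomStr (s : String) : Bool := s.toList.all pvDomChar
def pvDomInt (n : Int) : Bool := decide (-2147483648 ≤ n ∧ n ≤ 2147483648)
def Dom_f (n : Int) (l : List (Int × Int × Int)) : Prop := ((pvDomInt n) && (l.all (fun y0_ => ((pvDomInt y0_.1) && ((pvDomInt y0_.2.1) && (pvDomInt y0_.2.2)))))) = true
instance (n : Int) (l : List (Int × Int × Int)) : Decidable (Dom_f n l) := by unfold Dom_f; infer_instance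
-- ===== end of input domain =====

-- B sorts the edges by weight once and greedily sums the first (= cheapest) edge per
-- destination node via a visited array, instead of A's per-node weight buckets with a
-- second min()-per-bucket pass (objective: alternative).

-- ===== PORT A =====
-- loop body of A: 'if pl[b] is None: pl[b] = []' then 'pl[b].append(c)'
def fixNone (pl : List (Option (List Int))) (b : Int) : List (Option (List Int)) :=
  if PySem.List.pyGetD pl b none = none then PySem.List.pySetD pl b (some []) else pl

def stepA (pl : List (Option (List Int))) (t : Int × Int × Int) : List (Option (List Int)) :=
  PySem.List.pySetD (fixNone pl t.2.1) t.2.1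
    (some (((PySem.List.pyGetD (fixNone pl t.2.1) t.2.1 none).getD []) ++ [t.2.2]))

-- 'cr = sum([...]); if cr>2: return -1; return sum([min(p) ...])'
def finishA (pl : List (Option (List Int))) : Int :=
  if ((pl.countP (fun p => p.isNone) : Nat) : Int) > 2 then -1
  else
    -- '.getD 0' stands for min()'s ValueError on an empty list; entries are built non-empty
    ((pl.filterMap id).map (fun xs => (PySem.List.min? xs (fun x => x)).getD 0)).sum

def f (n : Int) (l : List (Int × Int × Int)) : Int :=
  finishA (List.foldl stepA (PySem.List.pyRepeat [none] (n + 1)) l)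

-- ===== PORT B =====
-- loop body of B: 'if not taken[b]: taken[b] = True; cnt += 1; total += c'
def stepT (st : List Bool × Int × Int) (t : Int × Int × Int) : List Bool × Int × Int :=
  if PySem.List.pyGetD st.1 t.2.1 false then st
  else (PySem.List.pySetD st.1 t.2.1 true, st.2.1 + 1, st.2.2 + t.2.2)

def f_alt (n : Int) (l : List (Int × Int × Int)) : Int :=
  let res := (PySem.List.sorted l (fun t : Int × Int × Int => t.2.2)).foldl stepT
      (PySem.List.pyRepeat [false] (n + 1), 0, 0)
  if (n + 1) - res.2.1 > 2 then -1 else res.2.2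

-- ===== PRECONDITION & SPEC =====
-- Pre_f excludes exactly the inputs where A raises IndexError: an edge whose
-- destination b is outside the valid index range of the length-(n+1) list.
def Pre_f (n : Int) (l : List (Int × Int × Int)) : Prop :=
  ∀ t ∈ l, -(max (n + 1) 0) ≤ t.2.1 ∧ t.2.1 < max (n + 1) 0
instance (n : Int) (l : List (Int × Int × Int)) : Decidable (Pre_f n l) := by
  unfold Pre_f; infer_instance

def pvWitness_f : Int × (List (Int × Int × Int)) := (2, [(1, 1, 5), (1, 2, 3)])

def Spec_f (n : Int) (l : List (Int × Int × Int)) (out : Int) : Prop := out = f_alt n l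
instance (n : Int) (l : List (Int × Int × Int)) (out : Int) : Decidable (Spec_f n l out) := by unfold Spec_f; infer_instance

-- ===== CLAIM (what is proved, stated in full; the proofs are below) =====
def Claim_equal_f : Prop := ∀ (n : Int) (l : List (Int × Int × Int)), Dom_f n l → Pre_f n l → Spec_f n l (f n l)

-- ===== LEMMAS AND PROOFS =====

-- proof-side abstraction of A: the per-node running minimum and its finish
def stepB (best : List (Option Int)) (t : Int × Int × Int) : List (Option Int) :=
  PySem.List.pySetD best t.2.1
    (some (match PySem.List.pyGetD best t.2.1 none with
           | none => t.2.2
           | some m => min m t.2.2))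

def finishB (best : List (Option Int)) : Int :=
  if ((best.countP (fun p => p.isNone) : Nat) : Int) > 2 then -1
  else (best.filterMap id).sum

/-- abstraction from A's state to the running-minimum state -/
def gmin (o : Option (List Int)) : Option Int :=
  o.bind (fun xs => PySem.List.min? xs (fun x => x))

lemma idx_ex {L : Nat} {b : Int} (h : -(L : Int) ≤ b ∧ b < L) :
    ∃ j, PySem.List.pyIdx? L b = some j ∧ j < L := by
  unfold PySem.List.pyIdx?
  split_ifs with h1 h2 h3
  · exact ⟨b.toNat, rfl, by omega⟩
  · omega
  · exact ⟨L - (-b).toNat, rfl, by omega⟩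
  · omega

lemma pyGetD_idx {α : Type} (xs : List α) {j : Nat} {b : Int}
    (hj : PySem.List.pyIdx? xs.length b = some j) (hlt : j < xs.length) (d : α) :
    PySem.List.pyGetD xs b d = xs[j] := by
  simp [PySem.List.pyGetD, PySem.List.pyGet?, hj, List.getElem?_eq_getElem hlt]

lemma pySetD_idx {α : Type} (xs : List α) {j : Nat} {b : Int}
    (hj : PySem.List.pyIdx? xs.length b = some j) (v : α) :
    PySem.List.pySetD xs b v = xs.set j v := by
  simp [PySem.List.pySetD, PySem.List.pySet?, hj]

lemma min?_append_some (xs : List Int) (c m : Int)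
    (hm : PySem.List.min? xs (fun x => x) = some m) :
    PySem.List.min? (xs ++ [c]) (fun x => x) = some (min m c) := by
  have h := hm
  simp only [PySem.List.min?] at h ⊢
  rw [List.foldl_append, h]
  simp only [List.foldl_cons, List.foldl_nil]
  split_ifs with hc <;> simp <;> omega

lemma step_eq (pl : List (Option (List Int))) (t : Int × Int × Int)
    (hne : ∀ o ∈ pl, o ≠ some [])
    (hr : -(pl.length : Int) ≤ t.2.1 ∧ t.2.1 < pl.length) :
    stepB (pl.map gmin) t = (stepA pl t).map gmin ∧
    (stepA pl t).length = pl.length ∧ (∀ o ∈ stepA pl t, o ≠ some []) := by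
  obtain ⟨j, hj, hjL⟩ := idx_ex hr
  have hjm : PySem.List.pyIdx? (pl.map gmin).length t.2.1 = some j := by
    simpa using hj
  have hjLm : j < (pl.map gmin).length := by simpa using hjL
  have hreadB : PySem.List.pyGetD (pl.map gmin) t.2.1 none = gmin pl[j] := by
    rw [pyGetD_idx _ hjm hjLm]; simp
  have hreadA : PySem.List.pyGetD pl t.2.1 none = pl[j] := pyGetD_idx _ hj hjL none
  have hsetB : stepB (pl.map gmin) t =
      (pl.map gmin).set j (some (match gmin pl[j] with
        | none => t.2.2 | some m => min m t.2.2)) := by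
    unfold stepB; rw [hreadB, pySetD_idx _ hjm]
  cases h0 : pl[j] with
  | none =>
      have hfix : fixNone pl t.2.1 = pl.set j (some []) := by
        unfold fixNone
        rw [hreadA, h0, if_pos rfl, pySetD_idx _ hj]
      have hA : stepA pl t = pl.set j (some [t.2.2]) := by
        unfold stepA
        rw [hfix]
        have hj' : PySem.List.pyIdx? (pl.set j (some [])).length t.2.1 = some j := by
          simpa using hj
        rw [pyGetD_idx _ hj' (by simpa using hjL), pySetD_idx _ hj']
        simp [List.getElem_set_self, List.set_set]
      refine ⟨?_, ?_, ?_⟩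
      · rw [hA, hsetB, h0, List.map_set]
        rfl
      · simp [hA]
      · intro o ho
        rw [hA] at ho
        rcases List.mem_or_eq_of_mem_set ho with h | h
        · exact hne o h
        · simp [h]
  | some xs =>
      have hxs : xs ≠ [] := by
        have := hne pl[j] (List.getElem_mem hjL)
        rw [h0] at this; simpa using this
      obtain ⟨m, hm⟩ : ∃ m, PySem.List.min? xs (fun x => x) = some m := by
        cases hmm : PySem.List.min? xs (fun x => x) with
        | none => exact absurd ((PySem.List.min?_eq_none_iff _ _).mp hmm) hxs
        | some m => exact ⟨m, rfl⟩
      have hfix : fixNone pl t.2.1 = pl := by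
        unfold fixNone
        rw [hreadA, h0, if_neg (by simp)]
      have hA : stepA pl t = pl.set j (some (xs ++ [t.2.2])) := by
        unfold stepA
        rw [hfix, pyGetD_idx _ hj hjL, h0, pySetD_idx _ hj]
        rfl
      refine ⟨?_, ?_, ?_⟩
      · rw [hA, hsetB, h0, List.map_set]
        have : gmin (some (xs ++ [t.2.2])) = some (min m t.2.2) := by
          simp [gmin, min?_append_some xs t.2.2 m hm]
        rw [this]
        have : gmin (some xs) = some m := by simp [gmin, hm]
        rw [this]
      · simp [hA]
      · intro o ho
        rw [hA] at ho
        rcases List.mem_or_eq_of_mem_set ho with h | h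
        · exact hne o h
        · simp [h]

lemma loop_eq (l : List (Int × Int × Int)) :
    ∀ (pl : List (Option (List Int))),
    (∀ o ∈ pl, o ≠ some []) →
    (∀ t ∈ l, -(pl.length : Int) ≤ t.2.1 ∧ t.2.1 < pl.length) →
    List.foldl stepB (pl.map gmin) l = (List.foldl stepA pl l).map gmin ∧
    (List.foldl stepA pl l).length = pl.length ∧
    (∀ o ∈ List.foldl stepA pl l, o ≠ some []) := by
  induction l with
  | nil => intro pl hne _; exact ⟨rfl, rfl, hne⟩
  | cons t l ih =>
      intro pl hne hpre
      obtain ⟨hmap, hlen, hne'⟩ := step_eq pl t hne (hpre t (by simp))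
      have hpre' : ∀ s ∈ l, -((stepA pl t).length : Int) ≤ s.2.1 ∧ s.2.1 < (stepA pl t).length := by
        intro s hs; rw [hlen]; exact hpre s (by simp [hs])
      obtain ⟨h1, h2, h3⟩ := ih (stepA pl t) hne' hpre'
      exact ⟨by simpa [hmap] using h1, by rw [List.foldl_cons, h2, hlen], by simpa using h3⟩

lemma countP_gmin (pl : List (Option (List Int))) (hne : ∀ o ∈ pl, o ≠ some []) :
    (pl.map gmin).countP (fun p => p.isNone) = pl.countP (fun p => p.isNone) := by
  rw [List.countP_map]
  apply List.countP_congr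
  intro o ho
  cases o with
  | none => rfl
  | some xs =>
      have hxs : xs ≠ [] := by have := hne _ ho; simpa using this
      obtain ⟨m, hm⟩ : ∃ m, PySem.List.min? xs (fun x => x) = some m := by
        cases hmm : PySem.List.min? xs (fun x => x) with
        | none => exact absurd ((PySem.List.min?_eq_none_iff _ _).mp hmm) hxs
        | some m => exact ⟨m, rfl⟩
      simp [Function.comp, gmin, hm]

lemma filterMap_gmin (pl : List (Option (List Int))) (hne : ∀ o ∈ pl, o ≠ some []) :
    (pl.map gmin).filterMap id =
      (pl.filterMap id).map (fun xs => (PySem.List.min? xs (fun x => x)).getD 0) := by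
  induction pl with
  | nil => rfl
  | cons o pl ih =>
      have ih' := ih (fun o ho => hne o (by simp [ho]))
      cases o with
      | none => simpa [gmin] using ih'
      | some xs =>
          have hxs : xs ≠ [] := by have := hne (some xs) (by simp); simpa using this
          obtain ⟨m, hm⟩ : ∃ m, PySem.List.min? xs (fun x => x) = some m := by
            cases hmm : PySem.List.min? xs (fun x => x) with
            | none => exact absurd ((PySem.List.min?_eq_none_iff _ _).mp hmm) hxs
            | some m => exact ⟨m, rfl⟩
          simp [gmin, hm]
          simpa [gmin] using ih'

/-- A equals the running-minimum abstraction. -/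
lemma f_eq_finishB (n : Int) (l : List (Int × Int × Int)) (hpre : Pre_f n l) :
    f n l = finishB (List.foldl stepB (List.replicate (n + 1).toNat none) l) := by
  unfold f
  have hrep : PySem.List.pyRepeat ([none] : List (Option (List Int))) (n + 1) =
      List.replicate (n + 1).toNat none := PySem.List.pyRepeat_singleton _ _
  have hne0 : ∀ o ∈ (List.replicate (n + 1).toNat (none : Option (List Int))), o ≠ some [] := by
    intro o ho; rw [List.eq_of_mem_replicate ho]; simp
  have hpre' : ∀ t ∈ l,
      -((List.replicate (n + 1).toNat (none : Option (List Int))).length : Int) ≤ t.2.1 ∧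
      t.2.1 < (List.replicate (n + 1).toNat (none : Option (List Int))).length := by
    intro t ht
    have := hpre t ht
    simp only [List.length_replicate]
    rw [Int.ofNat_toNat]
    exact this
  have hmapg : (List.replicate (n + 1).toNat (none : Option (List Int))).map gmin =
      List.replicate (n + 1).toNat (none : Option Int) := by
    simp [gmin]
  obtain ⟨hmap, _, hnef⟩ := loop_eq l _ hne0 hpre'
  rw [hrep, ← hmapg, hmap]
  unfold finishA finishB
  rw [countP_gmin _ hnef, filterMap_gmin _ hnef]

-- characterization of stepB via the resolved index
def combineMin (o : Option Int) (c : Int) : Option Int :=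
  some (match o with | none => c | some v => min v c)

lemma pyIdx?_lt {L : Nat} {b : Int} {j : Nat} (hj : PySem.List.pyIdx? L b = some j) :
    j < L := by
  unfold PySem.List.pyIdx? at hj
  split_ifs at hj with h1 h2 h3 <;> injection hj with hj <;> omega

lemma stepB_some {best : List (Option Int)} {t : Int × Int × Int} {j : Nat}
    (hj : PySem.List.pyIdx? best.length t.2.1 = some j) (hlt : j < best.length) :
    stepB best t = best.set j (combineMin best[j] t.2.2) := by
  unfold stepB
  rw [pyGetD_idx _ hj hlt, pySetD_idx _ hj]
  cases best[j] <;> rfl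

lemma stepB_none {best : List (Option Int)} {t : Int × Int × Int}
    (hj : PySem.List.pyIdx? best.length t.2.1 = none) :
    stepB best t = best := by
  unfold stepB
  simp [PySem.List.pySetD, PySem.List.pySet?, hj]

lemma length_stepB (best : List (Option Int)) (t : Int × Int × Int) :
    (stepB best t).length = best.length := by
  cases hj : PySem.List.pyIdx? best.length t.2.1 with
  | none => rw [stepB_none hj]
  | some j => rw [stepB_some hj (pyIdx?_lt hj)]; simp

lemma combineMin_comm (o : Option Int) (c1 c2 : Int) :
    combineMin (combineMin o c1) c2 = combineMin (combineMin o c2) c1 := by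
  cases o <;> simp [combineMin] <;> omega

lemma stepB_rcomm : ∀ (best : List (Option Int)) (t1 t2 : Int × Int × Int),
    stepB (stepB best t1) t2 = stepB (stepB best t2) t1 := by
  intro best t1 t2
  cases hj1 : PySem.List.pyIdx? best.length t1.2.1 with
  | none =>
      rw [stepB_none hj1]
      have h1' : PySem.List.pyIdx? (stepB best t2).length t1.2.1 = none := by
        rw [length_stepB]; exact hj1
      rw [stepB_none h1']
  | some j1 =>
      cases hj2 : PySem.List.pyIdx? best.length t2.2.1 with
      | none =>
          rw [stepB_none hj2]
          have h2' : PySem.List.pyIdx? (stepB best t1).length t2.2.1 = none := by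
            rw [length_stepB]; exact hj2
          rw [stepB_none h2']
      | some j2 =>
          have hl1 := pyIdx?_lt hj1
          have hl2 := pyIdx?_lt hj2
          have hj1' : PySem.List.pyIdx? (stepB best t2).length t1.2.1 = some j1 := by
            rw [length_stepB]; exact hj1
          have hj2' : PySem.List.pyIdx? (stepB best t1).length t2.2.1 = some j2 := by
            rw [length_stepB]; exact hj2
          have e1 : stepB best t1 = best.set j1 (combineMin best[j1] t1.2.2) :=
            stepB_some hj1 hl1
          have e2 : stepB best t2 = best.set j2 (combineMin best[j2] t2.2.2) :=
            stepB_some hj2 hl2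
          rw [stepB_some hj2' (pyIdx?_lt hj2'), stepB_some hj1' (pyIdx?_lt hj1')]
          by_cases hjj : j1 = j2
          · subst hjj
            have g1 : (stepB best t1)[j1]'(pyIdx?_lt hj2') = combineMin best[j1] t1.2.2 := by
              simp only [e1]
              exact List.getElem_set_self (by simpa using hl1)
            have g2 : (stepB best t2)[j1]'(pyIdx?_lt hj1') = combineMin best[j1] t2.2.2 := by
              simp only [e2]
              exact List.getElem_set_self (by simpa using hl1)
            rw [g1, g2, e1, e2]
            simp only [List.set_set]
            rw [combineMin_comm]
          · have g21 : (stepB best t1)[j2]'(pyIdx?_lt hj2') = best[j2] := by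
              simp only [e1]
              apply List.getElem_set_ne
              omega
            have g12 : (stepB best t2)[j1]'(pyIdx?_lt hj1') = best[j1] := by
              simp only [e2]
              apply List.getElem_set_ne
              omega
            rw [g21, g12, e1, e2, List.set_comm _ _ hjj]

lemma sum_set_int (l : List Int) : ∀ (i : Nat) (a : Int) (h : i < l.length),
    (l.set i a).sum = l.sum - l[i] + a := by
  induction l with
  | nil => intro i a h; simp at h
  | cons x l ih =>
      intro i a h
      cases i with
      | zero => simp [List.set]; omega
      | succ i =>
          have := ih i a (by simpa using h)
          simp [List.set, this]; omega

lemma sum_filterMap_eq_sum_map (xs : List (Option Int)) :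
    (xs.filterMap id).sum = (xs.map (fun o => o.getD 0)).sum := by
  induction xs with
  | nil => rfl
  | cons o xs ih =>
      cases o with
      | none =>
          rw [show List.filterMap id (none :: xs) = List.filterMap id xs from rfl]
          simpa using ih
      | some v =>
          rw [show List.filterMap id (some v :: xs) = v :: List.filterMap id xs from rfl]
          simpa using ih

lemma lockstep :
    ∀ (ls : List (Int × Int × Int)) (best : List (Option Int)) (taken : List Bool) (cnt tot : Int),
    taken.length = best.length →
    List.Pairwise (fun s t => s.2.2 ≤ t.2.2) ls →
    (∀ t ∈ ls, -(best.length : Int) ≤ t.2.1 ∧ t.2.1 < best.length) →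
    (∀ j (h : j < best.length) (h' : j < taken.length), best[j].isSome = taken[j]) →
    cnt = (best.countP (fun o => o.isSome) : Int) →
    tot = (best.map (fun o => o.getD 0)).sum →
    (∀ j (h : j < best.length) (v : Int), best[j] = some v → ∀ t ∈ ls, v ≤ t.2.2) →
    (ls.foldl stepT (taken, cnt, tot)).2.1 = ((ls.foldl stepB best).countP (fun o => o.isSome) : Int) ∧
    (ls.foldl stepT (taken, cnt, tot)).2.2 = ((ls.foldl stepB best).map (fun o => o.getD 0)).sum ∧
    (ls.foldl stepB best).length = best.length := by
  intro ls
  induction ls with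
  | nil =>
      intro best taken cnt tot _ _ _ _ hcnt htot _
      exact ⟨hcnt, htot, rfl⟩
  | cons t ls ih =>
      intro best taken cnt tot hlen hpw hb hI1 hcnt htot hI4
      obtain ⟨hpw1, hpw2⟩ := List.pairwise_cons.mp hpw
      obtain ⟨j, hj, hjlt⟩ := idx_ex (hb t (by simp))
      have hjt : PySem.List.pyIdx? taken.length t.2.1 = some j := by rw [hlen]; exact hj
      have hjlt' : j < taken.length := by omega
      have hread : PySem.List.pyGetD taken t.2.1 false = taken[j] := pyGetD_idx _ hjt hjlt' false
      have hstepB : stepB best t = best.set j (combineMin best[j] t.2.2) := stepB_some hj hjlt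
      simp only [List.foldl_cons]
      by_cases htk : taken[j] = true
      · -- node already taken: both states unchanged
        have hsome : best[j].isSome = true := by rw [hI1 j hjlt hjlt']; exact htk
        obtain ⟨v, hv⟩ : ∃ v, best[j] = some v := by
          cases h : best[j] with
          | none => rw [h] at hsome; simp at hsome
          | some v => exact ⟨v, rfl⟩
        have hvc : v ≤ t.2.2 := hI4 j hjlt v hv t (by simp)
        have hBid : stepB best t = best := by
          rw [hstepB, hv]
          have : combineMin (some v) t.2.2 = some v := by
            simp [combineMin, min_eq_left hvc]
          rw [this, ← hv, List.set_getElem_self]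
        have hTid : stepT (taken, cnt, tot) t = (taken, cnt, tot) := by
          unfold stepT
          simp only [hread]
          rw [if_pos htk]
        rw [hBid, hTid]
        exact ih best taken cnt tot hlen hpw2 (fun s hs => hb s (by simp [hs])) hI1 hcnt htot
          (fun j' h v' hv' s hs => hI4 j' h v' hv' s (by simp [hs]))
      · -- fresh node: B stores c; the greedy marks it and adds c
        have hfalse : taken[j] = false := by simpa using htk
        have hnone : best[j] = none := by
          have : best[j].isSome = false := by rw [hI1 j hjlt hjlt']; exact hfalse
          cases h : best[j] with
          | none => rfl
          | some v => rw [h] at this; simp at this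
        have hB : stepB best t = best.set j (some t.2.2) := by
          rw [hstepB, hnone]; rfl
        have hT : stepT (taken, cnt, tot) t = (taken.set j true, cnt + 1, tot + t.2.2) := by
          unfold stepT
          simp only [hread]
          rw [if_neg (by simp [hfalse]), pySetD_idx _ hjt]
        rw [hB, hT]
        have hset_len : (best.set j (some t.2.2)).length = best.length := by simp
        obtain ⟨g1, g2, g3⟩ := ih (best.set j (some t.2.2)) (taken.set j true) (cnt + 1)
          (tot + t.2.2)
          (by simpa using hlen) hpw2 (by simpa using fun s hs => hb s (by simp [hs]))
          (by -- membership invariant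
          intro j' h1' h2'
          by_cases hjj : j' = j
          · subst hjj
            simp [List.getElem_set_self]
          · rw [List.getElem_set_ne (by omega), List.getElem_set_ne (by omega)]
            exact hI1 j' (by simpa using h1') (by simpa using h2'))
          (by -- count invariant
          rw [List.countP_set hjlt, hnone]
          simp [hcnt])
          (by -- sum invariant
          rw [List.map_set]
          rw [sum_set_int _ j _ (by simpa using hjlt)]
          rw [List.getElem_map, hnone]
          simp [htot])
          (by -- min invariant
          intro j' h' v' hv' s hs
          by_cases hjj : j' = j
          · subst hjj
            rw [List.getElem_set_self] at hv'
            cases hv'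
            exact hpw1 s hs
          · rw [List.getElem_set_ne (by omega)] at hv'
            exact hI4 j' (by simpa using h') v' hv' s (by simp [hs]))
        exact ⟨g1, g2, by simpa using g3⟩

lemma replicate_isSome_countP (k : Nat) :
    (List.replicate k (none : Option Int)).countP (fun o => o.isSome) = 0 := by
  simp [List.countP_eq_zero]

-- ===== VERDICT (by name: the statement is the Claim_ definition above) =====
theorem f_spec : Claim_equal_f := by
  intro n l _ hpre
  unfold Spec_f
  rw [f_eq_finishB n l hpre]
  set ls := PySem.List.sorted l (fun t : Int × Int × Int => t.2.2) with hls
  have hperm : ls.Perm l := PySem.List.sorted_perm l _ _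
  haveI hrc : RightCommutative stepB := ⟨fun b t1 t2 => stepB_rcomm b t1 t2⟩
  have hfold : List.foldl stepB (List.replicate (n + 1).toNat none) l =
      List.foldl stepB (List.replicate (n + 1).toNat none) ls :=
    (hperm.foldl_eq _).symm
  rw [hfold]
  have hfa : f_alt n l =
      (if (n + 1) - ((PySem.List.sorted l (fun t : Int × Int × Int => t.2.2)).foldl stepT
            (PySem.List.pyRepeat [false] (n + 1), 0, 0)).2.1 > 2 then (-1 : Int)
        else ((PySem.List.sorted l (fun t : Int × Int × Int => t.2.2)).foldl stepT
            (PySem.List.pyRepeat [false] (n + 1), 0, 0)).2.2) := rfl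
  rw [hfa, ← hls]
  have hrepT : PySem.List.pyRepeat ([false] : List Bool) (n + 1) =
      List.replicate (n + 1).toNat false := PySem.List.pyRepeat_singleton _ _
  rw [hrepT]
  have hb : ∀ t ∈ ls,
      -(((List.replicate (n + 1).toNat (none : Option Int)).length : Nat) : Int) ≤ t.2.1 ∧
      t.2.1 < ((List.replicate (n + 1).toNat (none : Option Int)).length : Nat) := by
    intro t ht
    have := hpre t (hperm.mem_iff.mp ht)
    have hmax : (((n + 1).toNat : Nat) : Int) = max (n + 1) 0 := by omega
    simpa [hmax] using this
  have hpw : List.Pairwise (fun s t : Int × Int × Int => s.2.2 ≤ t.2.2) ls :=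
    PySem.List.sorted_pairwise l _
  obtain ⟨h1, h2, h3⟩ := lockstep ls (List.replicate (n + 1).toNat none)
    (List.replicate (n + 1).toNat false) 0 0
    (by simp) hpw hb
    (by intro j h h'; simp [List.getElem_replicate])
    (by simp [replicate_isSome_countP])
    (by simp)
    (by intro j h v hv; simp [List.getElem_replicate] at hv)
  set best' := List.foldl stepB (List.replicate (n + 1).toNat (none : Option Int)) ls with hbest'
  set res := List.foldl stepT (List.replicate (n + 1).toNat false, 0, 0) ls with hres
  have hlen' : best'.length = (n + 1).toNat := by rw [h3]; simp
  have hsplit : best'.countP (fun p => p.isNone) + best'.countP (fun o => o.isSome)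
      = (n + 1).toNat := by
    have h := List.length_eq_countP_add_countP (p := fun p : Option Int => p.isNone) (l := best')
    have h2 : best'.countP (fun a : Option Int => decide ¬(a.isNone = true))
        = best'.countP (fun o => o.isSome) := by
      apply List.countP_congr
      intro o _
      cases o <;> simp
    omega
  unfold finishB
  rw [h1, sum_filterMap_eq_sum_map, ← h2]
  have hcond : (((best'.countP (fun p => p.isNone) : Nat) : Int) > 2)
      ↔ ((n + 1) - ((best'.countP (fun o => o.isSome) : Nat) : Int) > 2) := by
    omega
  by_cases h : ((best'.countP (fun p => p.isNone) : Nat) : Int) > 2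
  · rw [if_pos h, if_pos (hcond.mp h)]
  · rw [if_neg h, if_neg (fun hc => h (hcond.mpr hc))]
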